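-- pv_equiv track=rewrite | github.com/Nusha/PyHomeworks | Seminar03/Task02/hw3-2.py | find_prod_pair_inlist
-- ===== SOURCE A (Python) =====
-- def find_prod_pair_inlist(firstlist):
--     secondlist = []
--     k = 0
--     j = len(firstlist) - 1
--     while k < j:
--         secondlist.append(firstlist[k] * firstlist[j])
--         k = k + 1
--         j = j - 1
--     if j == k:
--         secondlist.append(firstlist[k])
--         return secondlist
--     return secondlist
-- ===== SOURCE B (Python) =====
-- def find_prod_pair_inlist(firstlist):
--     # Push the first half on a stack, then walk the second half forward,
--     # popping a partner for each element; products come out innermost-first,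
--     # so reverse at the end; the middle element (odd length) is appended last.
--     n = len(firstlist)
--     half = n // 2
--     stack = firstlist[:half]
--     out = []
--     for x in firstlist[n - half:]:
--         out.append(stack.pop() * x)
--     out.reverse()
--     if n % 2 == 1:
--         out.append(firstlist[half])
--     return out
-- ===== Notes on version B (the rewrite author's own statement) =====
-- stated objective: alternative
-- what changed: Replaces A's two inward-converging index pointers with a LIFO stack of the first half consumed by a single forward pass over the second half, building the product list innermost-first and reversing it at the end (back-to-front construction instead of front-to-back index pairing).
import Mathlib
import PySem

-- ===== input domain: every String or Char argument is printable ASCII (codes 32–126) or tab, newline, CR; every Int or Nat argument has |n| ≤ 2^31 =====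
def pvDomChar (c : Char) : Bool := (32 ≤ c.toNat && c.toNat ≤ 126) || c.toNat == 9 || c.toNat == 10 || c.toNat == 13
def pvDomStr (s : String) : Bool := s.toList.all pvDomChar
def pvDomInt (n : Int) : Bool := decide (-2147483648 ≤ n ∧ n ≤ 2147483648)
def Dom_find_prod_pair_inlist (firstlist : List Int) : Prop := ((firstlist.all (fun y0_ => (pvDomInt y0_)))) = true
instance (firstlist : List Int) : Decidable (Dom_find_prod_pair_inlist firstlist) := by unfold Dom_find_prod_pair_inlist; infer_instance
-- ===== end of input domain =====

-- B replaces A's two inward-converging index pointers with a LIFO stack of the first half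
-- consumed by one forward pass over the second half, building the products innermost-first
-- and reversing at the end (alternative; same O(n) cost).

-- ===== PORT A =====
-- while k < j loop of A, with the accumulator secondlist; indices are always in
-- range while the loop runs, so pyGet? … |>.getD 0 is exact.
def findLoopA (l : List Int) (k j : Int) (acc : List Int) : List Int :=
  if k < j then
    findLoopA l (k + 1) (j - 1)
      (acc ++ [((PySem.List.pyGet? l k).getD 0) * ((PySem.List.pyGet? l j).getD 0)])
  else if j == k then acc ++ [(PySem.List.pyGet? l k).getD 0]
  else acc
termination_by (j - k).toNat
decreasing_by omega

def find_prod_pair_inlist (firstlist : List Int) : List Int :=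
  findLoopA firstlist 0 ((firstlist.length : Int) - 1) []

-- ===== PORT B =====
-- B's for-loop: for each x of the second half, pop the stack's last element and append
-- the product; on B's actual calls the stack is nonempty at every iteration (equal
-- lengths), so getLast?.getD 0 / dropLast are exact for stack.pop().
def popLoopB : List Int → List Int → List Int → List Int
  | [], _stack, out => out
  | x :: xs, stack, out => popLoopB xs stack.dropLast (out ++ [(stack.getLast?.getD 0) * x])

def find_prod_pair_inlist_alt (firstlist : List Int) : List Int :=
  let n : Int := firstlist.length
  let half := PySem.Int.floordiv n 2
  let stack := PySem.List.slice firstlist none (some half)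
  let out := popLoopB (PySem.List.slice firstlist (some (n - half)) none) stack []
  let res := out.reverse
  if n % 2 == 1 then res ++ [(PySem.List.pyGet? firstlist half).getD 0]
  else res

-- ===== PRECONDITION & SPEC =====
def Spec_find_prod_pair_inlist (firstlist : List Int) (out : List Int) : Prop := out = find_prod_pair_inlist_alt firstlist
instance (firstlist : List Int) (out : List Int) : Decidable (Spec_find_prod_pair_inlist firstlist out) := by unfold Spec_find_prod_pair_inlist; infer_instance

-- ===== CLAIM (what is proved, stated in full; the proofs are below) =====
def Claim_equal_find_prod_pair_inlist : Prop := ∀ (firstlist : List Int), Dom_find_prod_pair_inlist firstlist → Spec_find_prod_pair_inlist firstlist (find_prod_pair_inlist firstlist)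

-- ===== LEMMAS AND PROOFS =====
theorem findLoopA_acc (l : List Int) (k j : Int) (acc' : List Int) :
    ∀ acc, findLoopA l k j (acc ++ acc') = acc ++ findLoopA l k j acc' := by
  induction k, j, acc' using findLoopA.induct l with
  | case1 k j acc' h ih =>
      intro acc
      conv_lhs => rw [findLoopA]
      conv_rhs => rw [findLoopA]
      simp only [h, if_pos]
      rw [List.append_assoc]
      exact ih acc
  | case2 k j acc' h1 h2 =>
      intro acc
      conv_lhs => rw [findLoopA]
      conv_rhs => rw [findLoopA]
      simp [h1, h2, List.append_assoc]
  | case3 k j acc' h1 h2 =>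
      intro acc
      conv_lhs => rw [findLoopA]
      conv_rhs => rw [findLoopA]
      simp [h1, h2]

theorem pyGet_shift (a b : Int) (l : List Int) (i : Int) (h0 : 0 ≤ i) (h1 : i < (l.length : Int)) :
    PySem.List.pyGet? (a :: (l ++ [b])) (i + 1) = PySem.List.pyGet? l i := by
  rw [PySem.List.pyGet?_of_nonneg (xs := a :: (l ++ [b])) (i := i + 1) (by omega),
    PySem.List.pyGet?_of_nonneg (xs := l) (i := i) h0]
  have hi : (i + 1).toNat = i.toNat + 1 := by omega
  rw [hi]
  rw [List.getElem?_cons_succ]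
  rw [List.getElem?_append_left (by omega)]

theorem findLoopA_shift (a b : Int) (l : List Int) (k j : Int) (acc : List Int) :
    0 ≤ k → j < (l.length : Int) →
    findLoopA (a :: (l ++ [b])) (k + 1) (j + 1) acc = findLoopA l k j acc := by
  induction k, j, acc using findLoopA.induct l with
  | case1 k j acc h ih =>
      intro hk hj
      conv_lhs => rw [findLoopA]
      conv_rhs => rw [findLoopA]
      simp only [h, if_pos, show k + 1 < j + 1 from by omega]
      rw [pyGet_shift a b l k hk (by omega), pyGet_shift a b l j (by omega) hj]
      have := ih (by omega) (by omega)
      rw [show j + 1 - 1 = (j - 1) + 1 from by ring]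
      exact this
  | case2 k j acc h1 h2 =>
      intro hk hj
      have hjk : j = k := by simpa using h2
      conv_lhs => rw [findLoopA]
      conv_rhs => rw [findLoopA]
      simp only [show ¬(k + 1 < j + 1) from by omega, if_neg, h1, not_false_iff]
      simp only [show (j + 1 == k + 1) = true from by simp [hjk], h2, if_pos]
      rw [pyGet_shift a b l k hk (by omega)]
  | case3 k j acc h1 h2 =>
      intro hk hj
      conv_lhs => rw [findLoopA]
      conv_rhs => rw [findLoopA]
      have : ¬ ((j:Int) = k) := by simpa using h2
      simp only [show ¬(k + 1 < j + 1) from by omega, if_neg, h1, not_false_iff,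
        show (j + 1 == k + 1) = false from by simp; omega, h2]
      simp

theorem portA_step (a b : Int) (l : List Int) :
    find_prod_pair_inlist (a :: (l ++ [b])) = a * b :: find_prod_pair_inlist l := by
  unfold find_prod_pair_inlist
  have hlen : ((a :: (l ++ [b])).length : Int) - 1 = (l.length : Int) + 1 := by
    simp
  rw [hlen]
  rw [findLoopA]
  by_cases hl : 0 < (l.length : Int) + 1
  · rw [if_pos hl]
    have h0 : PySem.List.pyGet? (a :: (l ++ [b])) 0 = some a := by
      simp [PySem.List.pyGet?_zero_cons]
    have hb : PySem.List.pyGet? (a :: (l ++ [b])) ((l.length : Int) + 1) = some b := by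
      rw [PySem.List.pyGet?_of_nonneg _ (by omega)]
      have : ((l.length : Int) + 1).toNat = l.length + 1 := by omega
      rw [this, List.getElem?_cons_succ]
      simp
    rw [h0, hb]
    rw [show (l.length : Int) + 1 - 1 = ((l.length : Int) - 1) + 1 from by ring,
      show (0 : Int) + 1 = 0 + 1 from rfl]
    rw [findLoopA_shift a b l 0 ((l.length : Int) - 1) _ (by omega) (by omega)]
    have hacc := (findLoopA_acc l 0 ((l.length : Int) - 1) []) [a * b]
    simp only [List.append_nil, List.nil_append, Option.getD_some] at hacc ⊢
    rw [hacc]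
    rfl
  · exact (hl (by omega)).elim

theorem popLoopB_append (a b : Int) (xs : List Int) :
    ∀ (stack : List Int), xs.length = stack.length →
    ∀ out, popLoopB (xs ++ [b]) (a :: stack) out = popLoopB xs stack out ++ [a * b] := by
  induction xs with
  | nil =>
      intro stack h out
      have : stack = [] := by cases stack <;> simp_all
      subst this
      simp [popLoopB]
  | cons x xs ih =>
      intro stack h out
      cases stack with
      | nil => simp at h
      | cons s ss =>
          simp only [List.cons_append, popLoopB]
          rw [show (a :: s :: ss).dropLast = a :: (s :: ss).dropLast from by simp,
            List.getLast?_cons_cons]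
          exact ih (s :: ss).dropLast (by simp at h ⊢; omega) _

theorem portB_step (a b : Int) (l : List Int) :
    find_prod_pair_inlist_alt (a :: (l ++ [b])) = a * b :: find_prod_pair_inlist_alt l := by
  unfold find_prod_pair_inlist_alt
  dsimp only
  have hlen : ((a :: (l ++ [b])).length : Int) = (l.length : Int) + 2 := by simp; omega
  rw [hlen]
  have hfd2 : PySem.Int.floordiv ((l.length : Int) + 2) 2 = ((l.length / 2 : Nat) : Int) + 1 := by
    rw [PySem.Int.floordiv_eq_ediv_of_pos (by omega)]
    omega
  have hfd : PySem.Int.floordiv ((l.length : Int)) 2 = ((l.length / 2 : Nat) : Int) := by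
    rw [PySem.Int.floordiv_eq_ediv_of_pos (by omega)]
    omega
  rw [hfd2, hfd]
  have hhalf_le : l.length / 2 ≤ l.length := Nat.div_le_self _ _
  -- the two stacks
  have hstack : PySem.List.slice (a :: (l ++ [b])) none (some (((l.length / 2 : Nat) : Int) + 1))
      = a :: l.take (l.length / 2) := by
    rw [show ((l.length / 2 : Nat) : Int) + 1 = ((l.length / 2 + 1 : Nat) : Int) from by push_cast; ring]
    rw [PySem.List.slice_to_natCast, List.take_succ_cons,
      List.take_append_of_le_length hhalf_le]
  have hstackm : PySem.List.slice l none (some ((l.length / 2 : Nat) : Int)) = l.take (l.length / 2) :=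
    PySem.List.slice_to_natCast l _
  -- the two second halves
  have hsec : PySem.List.slice (a :: (l ++ [b]))
      (some ((l.length : Int) + 2 - (((l.length / 2 : Nat) : Int) + 1))) none
      = l.drop (l.length - l.length / 2) ++ [b] := by
    rw [show (l.length : Int) + 2 - (((l.length / 2 : Nat) : Int) + 1)
        = ((l.length - l.length / 2 + 1 : Nat) : Int) from by push_cast [hhalf_le]; ring]
    rw [PySem.List.slice_from_natCast]
    simp only [List.drop_succ_cons]
    rw [List.drop_append_of_le_length (by omega)]
  have hsecm : PySem.List.slice l (some ((l.length : Int) - ((l.length / 2 : Nat) : Int))) none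
      = l.drop (l.length - l.length / 2) := by
    rw [show (l.length : Int) - ((l.length / 2 : Nat) : Int)
        = ((l.length - l.length / 2 : Nat) : Int) from by push_cast [hhalf_le]; ring]
    exact PySem.List.slice_from_natCast l _
  rw [hstack, hstackm, hsec, hsecm]
  rw [popLoopB_append a b _ _ (by simp; omega)]
  rw [List.reverse_append]
  simp only [List.reverse_singleton, List.singleton_append]
  have hmod : (((l.length : Int) + 2) % 2 == 1) = ((l.length : Int) % 2 == 1) := by
    congr 1
    omega
  rw [hmod]
  by_cases hodd : ((l.length : Int) % 2 == 1) = true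
  · rw [if_pos hodd, if_pos hodd]
    have hmid : PySem.List.pyGet? (a :: (l ++ [b])) (((l.length / 2 : Nat) : Int) + 1)
        = PySem.List.pyGet? l ((l.length / 2 : Nat) : Int) := by
      apply pyGet_shift
      · omega
      · have h1 : ((l.length : Int)) % 2 = 1 := by simpa using hodd
        omega
    rw [hmid, List.cons_append]
  · rw [if_neg hodd, if_neg hodd]

theorem ports_agree (l : List Int) :
    find_prod_pair_inlist l = find_prod_pair_inlist_alt l := by
  induction l using List.bidirectionalRec with
  | nil =>
      rw [find_prod_pair_inlist, findLoopA]
      simp [find_prod_pair_inlist_alt, popLoopB, PySem.List.slice, PySem.Int.floordiv]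
  | singleton a =>
      rw [find_prod_pair_inlist, findLoopA]
      simp [find_prod_pair_inlist_alt, popLoopB, PySem.List.slice, PySem.Int.floordiv,
        PySem.List.pyGet?, PySem.List.pyIdx?]
  | cons_append a l b ih => rw [portA_step, portB_step, ih]

-- ===== VERDICT (by name: the statement is the Claim_ definition above) =====
theorem find_prod_pair_inlist_spec : Claim_equal_find_prod_pair_inlist := by
  intro l _
  unfold Spec_find_prod_pair_inlist
  exact ports_agree l
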